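-- pv_equiv track=rewrite | github.com/zoolake/pythonPS | programmers/신고결과받기.py | solution
-- ===== SOURCE A (Python) =====
-- from collections import defaultdict
--
-- def solution(id_list, report, k):
--     answer = []
--
--     # (유저-신고대상목록) 딕셔너리 생성
--     dict = defaultdict(set)
--     counter = defaultdict(int)
--     for elem in report:
--         user_report, user_reported = elem.split()
--         if user_reported not in dict[user_report]:
--             counter[user_reported] += 1
--             dict[user_report].add(user_reported)
--
--     for id in id_list:
--         count = 0
--         for user in dict[id]:
--             if counter[user] >= k:
--                 count += 1
--         answer.append(count)
--
--     return answer
-- ===== SOURCE B (Python) =====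
-- def solution(id_list, report, k):
--     pairs = set()
--     for elem in report:
--         reporter, reported = elem.split()
--         pairs.add((reporter, reported))
--     reporter_count = {}
--     for reporter, reported in pairs:
--         reporter_count[reported] = reporter_count.get(reported, 0) + 1
--     banned = {t for t, c in reporter_count.items() if c >= k}
--     tally = {}
--     for reporter, reported in pairs:
--         if reported in banned:
--             tally[reporter] = tally.get(reporter, 0) + 1
--     return [tally.get(i, 0) for i in id_list]
-- ===== Notes on version B (the rewrite author's own statement) =====
-- stated objective: alternative
-- what changed: A folds reports into a per-reporter dict of reported-sets plus a counter and then runs a nested counting loop per id; B dedups the reports into a set of (reporter, reported) pairs, counts distinct reporters per reported user, builds the banned set, tallies banned pairs per reporter in one flat pass, and reads the answer off the tally with get(id, 0).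
import Mathlib
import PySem

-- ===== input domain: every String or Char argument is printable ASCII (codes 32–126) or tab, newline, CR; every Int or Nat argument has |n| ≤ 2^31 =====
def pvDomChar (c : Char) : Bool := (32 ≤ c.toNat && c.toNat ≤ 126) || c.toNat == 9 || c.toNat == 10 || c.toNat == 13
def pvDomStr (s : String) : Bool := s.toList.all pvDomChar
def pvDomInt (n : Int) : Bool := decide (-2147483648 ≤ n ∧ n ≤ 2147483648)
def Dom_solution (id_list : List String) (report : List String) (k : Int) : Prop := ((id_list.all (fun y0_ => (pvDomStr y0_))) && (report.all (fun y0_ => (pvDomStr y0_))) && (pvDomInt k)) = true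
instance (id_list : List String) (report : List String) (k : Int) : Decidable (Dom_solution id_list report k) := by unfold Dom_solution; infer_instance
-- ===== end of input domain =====

-- B replaces A's per-reporter dict-of-sets fold and nested counting loop by a dedup-pairs /
-- distinct-reporter-count / banned-set / tally pipeline (same cost, different decomposition).
-- 'r, t = e.split()' in both Pythons: exactly two whitespace-separated tokens; outside Pre_ (≠ 2 tokens)
-- Python raises ValueError, and this total helper returns a dummy pair there.
def pvPairOf (e : String) : String × String :=
  match PySem.Str.split₀ e with
  | [r, t] => (r, t)
  | _ => ("", "")

-- ===== PORT A =====
-- loop body of A's first 'for elem in report' (state = (dict, counter))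
def pvStepA (st : PySem.Dict String (PySem.Set String) × PySem.Dict String Int) (elem : String) :
    PySem.Dict String (PySem.Set String) × PySem.Dict String Int :=
  let r := (pvPairOf elem).1
  let t := (pvPairOf elem).2
  let s := st.1.getD r []
  if s.contains t then st
  else (st.1.insert r (PySem.Set.add s t), st.2.insert t (st.2.getD t 0 + 1))

def solution (id_list : List String) (report : List String) (k : Int) : List Int :=
  let st := report.foldl pvStepA (PySem.Dict.empty, PySem.Dict.empty)
  id_list.foldl (fun answer id =>
    answer ++ [(st.1.getD id []).foldl
      (fun count u => if k ≤ st.2.getD u 0 then count + 1 else count) 0]) []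

-- ===== PORT B =====
def solution_alt (id_list : List String) (report : List String) (k : Int) : List Int :=
  let pairs : PySem.Set (String × String) := PySem.Set.ofList (report.map pvPairOf)
  let rcount : PySem.Dict String Int :=
    pairs.foldl (fun d p => d.insert p.2 (d.getD p.2 0 + 1)) PySem.Dict.empty
  let banned : PySem.Set String :=
    PySem.Set.ofList ((rcount.items.filter (fun it => k ≤ it.2)).map (fun it => it.1))
  let tally : PySem.Dict String Int :=
    pairs.foldl (fun d p => if banned.contains p.2 then d.insert p.1 (d.getD p.1 0 + 1) else d)
      PySem.Dict.empty
  id_list.map (fun i => tally.getD i 0)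

-- ===== PRECONDITION & SPEC =====
-- Pre_ excludes exactly the report entries that do not split into two tokens, where A raises ValueError.
def Pre_solution (id_list : List String) (report : List String) (k : Int) : Prop :=
  ∀ e ∈ report, (PySem.Str.split₀ e).length = 2
instance (id_list : List String) (report : List String) (k : Int) : Decidable (Pre_solution id_list report k) := by unfold Pre_solution; infer_instance
def pvWitness_solution : List String × List String × Int := (["muzi", "frodo"], ["muzi frodo", "frodo muzi", "muzi frodo"], 1)

def Spec_solution (id_list : List String) (report : List String) (k : Int) (out : List Int) : Prop := out = solution_alt id_list report k
instance (id_list : List String) (report : List String) (k : Int) (out : List Int) : Decidable (Spec_solution id_list report k out) := by unfold Spec_solution; infer_instance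

-- ===== CLAIM (what is proved, stated in full; the proofs are below) =====
def Claim_equal_solution : Prop := ∀ (id_list : List String) (report : List String) (k : Int), Dom_solution id_list report k → Pre_solution id_list report k → Spec_solution id_list report k (solution id_list report k)

-- ===== LEMMAS AND PROOFS =====

lemma pv_ofList_append_singleton {α : Type} [BEq α] (xs : List α) (x : α) :
    PySem.Set.ofList (xs ++ [x]) = PySem.Set.add (PySem.Set.ofList xs) x := by
  simp [PySem.Set.ofList_eq_foldl, List.foldl_append]

lemma pv_getD_empty (t : String) : (PySem.Dict.empty : PySem.Dict String Int).getD t 0 = 0 := rfl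

-- a second-component counting fold over a pair list computes the count of seconds
lemma pv_count_snd (P : List (String × String)) (t : String) :
    (P.foldl (fun d p => d.insert p.2 (d.getD p.2 0 + 1)) (PySem.Dict.empty : PySem.Dict String Int)).getD t 0
      = ((P.map (fun p => p.2)).count t : Int) := by
  have h : P.foldl (fun d p => d.insert p.2 (d.getD p.2 0 + 1)) (PySem.Dict.empty : PySem.Dict String Int)
      = (P.map (fun p => p.2)).foldl (fun d x => d.insert x (d.getD x 0 + 1)) (PySem.Dict.empty : PySem.Dict String Int) := by
    rw [List.foldl_map]
  rw [h, PySem.Dict.getD_foldl_insert_add_one, pv_getD_empty, zero_add]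

-- B's guarded tally fold counts the firsts of the pairs passing the guard
lemma pv_tally (P : List (String × String)) (c : String × String → Bool) (i : String) :
    (P.foldl (fun d p => if c p then d.insert p.1 (d.getD p.1 0 + 1) else d) (PySem.Dict.empty : PySem.Dict String Int)).getD i 0
      = (((P.filter c).map (fun p => p.1)).count i : Int) := by
  have h1 : P.foldl (fun d p => if c p then d.insert p.1 (d.getD p.1 0 + 1) else d) (PySem.Dict.empty : PySem.Dict String Int)
      = (P.filter c).foldl (fun d p => d.insert p.1 (d.getD p.1 0 + 1)) (PySem.Dict.empty : PySem.Dict String Int) := by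
    rw [List.foldl_filter]
  have h2 : (P.filter c).foldl (fun d p => d.insert p.1 (d.getD p.1 0 + 1)) (PySem.Dict.empty : PySem.Dict String Int)
      = ((P.filter c).map (fun p => p.1)).foldl (fun d x => d.insert x (d.getD x 0 + 1)) (PySem.Dict.empty : PySem.Dict String Int) := by
    rw [List.foldl_map]
  rw [h1, h2, PySem.Dict.getD_foldl_insert_add_one, pv_getD_empty, zero_add]

-- the invariant of A's first loop: dict[r] lists the seconds of the deduped pairs with first r,
-- counter[t] counts the deduped pairs with second t
lemma pvInvA (l : List String) :
    (∀ r, (l.foldl pvStepA (PySem.Dict.empty, PySem.Dict.empty)).1.getD r [] =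
      ((PySem.Set.ofList (l.map pvPairOf)).filter (fun p => p.1 == r)).map (fun p => p.2)) ∧
    (∀ t, (l.foldl pvStepA (PySem.Dict.empty, PySem.Dict.empty)).2.getD t 0 =
      (((PySem.Set.ofList (l.map pvPairOf)).map (fun p => p.2)).count t : Int)) := by
  induction l using List.reverseRecOn with
  | nil => constructor <;> intro x <;> rfl
  | append_singleton l e ih =>
    obtain ⟨ihd, ihc⟩ := ih
    rw [List.foldl_append]
    simp only [List.map_append, List.map_cons, List.map_nil, List.foldl, pv_ofList_append_singleton]
    set st := l.foldl pvStepA (PySem.Dict.empty, PySem.Dict.empty) with hst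
    set Q := PySem.Set.ofList (l.map pvPairOf) with hQ
    have hmem : (st.1.getD (pvPairOf e).1 []).contains (pvPairOf e).2 = true ↔ pvPairOf e ∈ Q := by
      rw [ihd]
      simp only [PySem.Set.contains, List.contains_iff_mem, List.mem_map, List.mem_filter]
      constructor
      · rintro ⟨p, ⟨hp, hr⟩, ht⟩
        have : p = pvPairOf e := by
          apply Prod.ext
          · exact (beq_iff_eq.mp hr)
          · exact ht
        rwa [this] at hp
      · intro hp
        exact ⟨pvPairOf e, ⟨hp, beq_self_eq_true _⟩, rfl⟩
    by_cases hc : (st.1.getD (pvPairOf e).1 []).contains (pvPairOf e).2 = true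
    · -- pair already seen: state unchanged, dedup unchanged
      have hQadd : PySem.Set.add Q (pvPairOf e) = Q := by
        simp only [PySem.Set.add, PySem.Set.contains, List.contains_iff_mem]
        rw [if_pos (hmem.mp hc)]
      unfold pvStepA
      rw [if_pos hc, hQadd]
      exact ⟨ihd, ihc⟩
    · -- new pair: appended to the dedup list
      have hnm : pvPairOf e ∉ Q := fun h => hc (hmem.mpr h)
      have hQadd : PySem.Set.add Q (pvPairOf e) = Q ++ [pvPairOf e] := by
        simp only [PySem.Set.add, PySem.Set.contains, List.contains_iff_mem]
        rw [if_neg hnm]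
      unfold pvStepA
      rw [if_neg hc, hQadd]
      constructor
      · intro r
        rw [PySem.Dict.getD_insert]
        by_cases hr : r = (pvPairOf e).1
        · rw [if_pos hr, List.filter_append, List.map_append, ← ihd]
          have hsmem : (pvPairOf e).2 ∉ st.1.getD (pvPairOf e).1 [] := by
            intro h
            exact hc (by simp only [PySem.Set.contains]; exact List.contains_iff_mem.mpr h)
          simp only [PySem.Set.add, PySem.Set.contains, List.contains_iff_mem]
          rw [if_neg hsmem, hr]
          simp [List.filter]
        · rw [if_neg hr, List.filter_append, List.map_append, ihd]
          have : ((pvPairOf e).1 == r) = false := by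
            simp only [beq_eq_false_iff_ne]
            exact fun h => hr h.symm
          simp [List.filter, this]
      · intro t
        rw [PySem.Dict.getD_insert]
        rw [List.map_append, List.count_append]
        by_cases ht : t = (pvPairOf e).2
        · rw [if_pos ht, ihc, ht]
          simp
        · rw [if_neg ht, ihc]
          have : ((pvPairOf e).2 == t) = false := by
            simp only [beq_eq_false_iff_ne]
            exact fun h => ht h.symm
          simp [List.count_singleton, this]

-- membership in B's banned set, for users that are actually reported at least once
lemma pv_banned (P : List (String × String)) (k : Int) (t : String)
    (hmem : t ∈ P.map (fun p => p.2)) :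
    (PySem.Set.ofList
        (((P.foldl (fun d p => d.insert p.2 (d.getD p.2 0 + 1)) (PySem.Dict.empty : PySem.Dict String Int)).items.filter
          (fun it => k ≤ it.2)).map (fun it => it.1))).contains t
      = decide (k ≤ ((P.map (fun p => p.2)).count t : Int)) := by
  set rc := P.foldl (fun d p => d.insert p.2 (d.getD p.2 0 + 1)) (PySem.Dict.empty : PySem.Dict String Int) with hrc
  have hnodup : rc.keys.Nodup :=
    PySem.Dict.nodup_keys_foldl_insert_key P (fun p => p.2) (fun d p => d.getD p.2 0 + 1) _
      (by simp [PySem.Dict.empty, PySem.Dict.keys_mk])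
  have hkeys : rc.keys = PySem.Set.ofList (P.map (fun p => p.2)) := by
    rw [hrc, PySem.Dict.keys_foldl_insert_key P (fun p => p.2) (fun d p => d.getD p.2 0 + 1)]
    simp [PySem.Dict.empty, PySem.Dict.keys_mk, PySem.Set.update, PySem.Set.ofList_eq_foldl]
  have hitems := PySem.Dict.items_eq_map_keys rc hnodup 0
  rw [hitems, List.filter_map, List.map_map]
  have hkm : t ∈ rc.keys := by
    rw [hkeys, PySem.Set.mem_ofList]; exact hmem
  have hgd : rc.getD t 0 = ((P.map (fun p => p.2)).count t : Int) := pv_count_snd P t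
  by_cases hk : k ≤ ((P.map (fun p => p.2)).count t : Int)
  · have : t ∈ (PySem.Set.ofList
        ((rc.keys.filter ((fun it : String × Int => decide (k ≤ it.2)) ∘ fun kk => (kk, rc.getD kk 0))).map
          ((fun it : String × Int => it.1) ∘ fun kk => (kk, rc.getD kk 0)))) := by
      rw [PySem.Set.mem_ofList, List.mem_map]
      refine ⟨t, ?_, rfl⟩
      rw [List.mem_filter]
      exact ⟨hkm, by simp only [Function.comp, decide_eq_true_eq]; rw [hgd]; exact hk⟩
    have hco : (PySem.Set.ofList
        ((rc.keys.filter ((fun it : String × Int => decide (k ≤ it.2)) ∘ fun kk => (kk, rc.getD kk 0))).map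
          ((fun it : String × Int => it.1) ∘ fun kk => (kk, rc.getD kk 0)))).contains t = true := by
      simp only [PySem.Set.contains]; exact List.contains_iff_mem.mpr this
    rw [hco]
    exact (decide_eq_true hk).symm
  · have : t ∉ (PySem.Set.ofList
        ((rc.keys.filter ((fun it : String × Int => decide (k ≤ it.2)) ∘ fun kk => (kk, rc.getD kk 0))).map
          ((fun it : String × Int => it.1) ∘ fun kk => (kk, rc.getD kk 0)))) := by
      rw [PySem.Set.mem_ofList, List.mem_map]
      rintro ⟨u, hu, hut⟩
      simp only [Function.comp] at hu hut
      rw [List.mem_filter] at hu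
      apply hk
      rw [← hgd, show t = u from hut.symm]
      simpa using hu.2
    have hco : (PySem.Set.ofList
        ((rc.keys.filter ((fun it : String × Int => decide (k ≤ it.2)) ∘ fun kk => (kk, rc.getD kk 0))).map
          ((fun it : String × Int => it.1) ∘ fun kk => (kk, rc.getD kk 0)))).contains t = false := by
      rw [Bool.eq_false_iff]
      intro htrue
      exact this (List.contains_iff_mem.mp (by simpa [PySem.Set.contains] using htrue))
    rw [hco]
    exact (decide_eq_false hk).symm

-- ===== VERDICT (by name: the statement is the Claim_ definition above) =====
theorem solution_spec : Claim_equal_solution := by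
  intro id_list report k _hdom _hpre
  unfold Spec_solution solution solution_alt
  obtain ⟨ihd, ihc⟩ := pvInvA report
  set Q := PySem.Set.ofList (report.map pvPairOf) with hQ
  rw [PySem.List.foldl_append_singleton_eq_map]
  simp only [List.nil_append]
  apply List.map_congr_left
  intro id _hid
  rw [ihd]
  rw [show (fun (count : Int) u =>
        if k ≤ (report.foldl pvStepA (PySem.Dict.empty, PySem.Dict.empty)).2.getD u 0 then count + 1 else count)
      = (fun (count : Int) u =>
        if (fun u => decide (k ≤ (report.foldl pvStepA (PySem.Dict.empty, PySem.Dict.empty)).2.getD u 0)) u = true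
        then count + 1 else count) from by funext c u; simp]
  rw [PySem.List.foldl_count_if]
  rw [pv_tally]
  rw [zero_add, List.count_eq_countP, List.countP_map, List.countP_map, List.countP_filter, List.countP_filter]
  congr 1
  apply List.countP_congr
  intro p hp
  simp only [Function.comp]
  rw [pv_banned Q k p.2 (List.mem_map_of_mem hp), ihc p.2]
  constructor <;> (intro h; simp only [Bool.and_eq_true, decide_eq_true_eq, beq_iff_eq] at *) <;>
    exact ⟨h.2, h.1⟩
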